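-- pv_equiv track=rewrite | github.com/tkiryuti/GT | Human-Microbiome-project/4-Metadata/Scripts/ncbi-metadata.py | get_geo_loc
-- ===== SOURCE A (Python) =====
-- def get_geo_loc(entry, geoloc, latitude, longitude):
-- 	# entry: 	list that stores the search result of interest
-- 	for line in entry:
-- 		if line[0] == 'geographic location':
-- 			geoloc = line[1]
-- 		elif line[0] == 'geographic location (latitude)':
-- 			latitude = line[1]
-- 		elif line[0] == 'geographic location (longitude)':
-- 			longitude = line[1]
-- 	return( [geoloc, latitude, longitude] )
-- ===== SOURCE B (Python) =====
-- def _find_last(entry, key, default):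
--     # first match scanning back-to-front == last match of a forward pass
--     for line in reversed(entry):
--         if len(line) >= 2 and line[0] == key:
--             return line[1]
--     return default
--
-- def get_geo_loc(entry, geoloc, latitude, longitude):
--     return [_find_last(entry, 'geographic location', geoloc),
--             _find_last(entry, 'geographic location (latitude)', latitude),
--             _find_last(entry, 'geographic location (longitude)', longitude)]
-- ===== Notes on version B (the rewrite author's own statement) =====
-- stated objective: alternative
-- what changed: Replaces A's single forward pass mutating three variables via an if/elif ladder with three independent backward scans, each returning early at the first (i.e. forward-last) occurrence of its key.
import Mathlib
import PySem

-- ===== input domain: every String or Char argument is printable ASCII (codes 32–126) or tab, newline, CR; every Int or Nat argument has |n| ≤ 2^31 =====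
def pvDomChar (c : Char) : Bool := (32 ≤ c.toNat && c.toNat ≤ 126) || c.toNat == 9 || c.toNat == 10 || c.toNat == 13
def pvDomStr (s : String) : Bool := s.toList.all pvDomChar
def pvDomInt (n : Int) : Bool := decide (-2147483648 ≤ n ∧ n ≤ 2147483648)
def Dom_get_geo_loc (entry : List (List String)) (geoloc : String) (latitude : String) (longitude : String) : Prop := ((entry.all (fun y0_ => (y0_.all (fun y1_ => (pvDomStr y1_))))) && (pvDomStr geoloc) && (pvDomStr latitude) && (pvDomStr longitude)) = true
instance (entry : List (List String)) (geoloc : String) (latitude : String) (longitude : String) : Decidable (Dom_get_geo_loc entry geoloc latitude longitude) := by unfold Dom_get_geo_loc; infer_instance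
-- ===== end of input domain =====

-- B replaces A's single forward pass mutating three variables with three independent
-- backward scans, each returning early at the first (= forward-last) occurrence of its
-- key (objective: alternative decomposition, same cost).

-- ===== PORT A =====
-- step of A's for-loop: the if/elif ladder over line[0], updating the (geoloc, latitude, longitude) state
def pvStepA (st : String × String × String) (line : List String) : String × String × String :=
  match PySem.List.pyGet? line 0 with
  | none => st  -- unreachable under Pre_: Python raises IndexError on line[0]
  | some h =>
    if h = "geographic location" then
      match PySem.List.pyGet? line 1 with
      | none => st  -- unreachable under Pre_: IndexError on line[1]
      | some v => (v, st.2.1, st.2.2)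
    else if h = "geographic location (latitude)" then
      match PySem.List.pyGet? line 1 with
      | none => st
      | some v => (st.1, v, st.2.2)
    else if h = "geographic location (longitude)" then
      match PySem.List.pyGet? line 1 with
      | none => st
      | some v => (st.1, st.2.1, v)
    else st

def get_geo_loc (entry : List (List String)) (geoloc : String) (latitude : String) (longitude : String) : List String :=
  let st := entry.foldl pvStepA (geoloc, latitude, longitude)
  [st.1, st.2.1, st.2.2]

-- ===== PORT B =====
-- B's helper _find_last: scan the reversed list, return line[1] at the first line with
-- len(line) >= 2 and line[0] == key; the default if no line matches.
def pvFindLast : List (List String) → String → String → String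
  | [], _, d => d
  | line :: rest, k, d =>
    match line with
    | a :: b :: _ => if a = k then b else pvFindLast rest k d
    | _ => pvFindLast rest k d

def get_geo_loc_alt (entry : List (List String)) (geoloc : String) (latitude : String) (longitude : String) : List String :=
  [pvFindLast entry.reverse "geographic location" geoloc,
   pvFindLast entry.reverse "geographic location (latitude)" latitude,
   pvFindLast entry.reverse "geographic location (longitude)" longitude]

-- ===== PRECONDITION & SPEC =====
-- Pre_ excludes exactly the inputs on which A raises IndexError: an empty line (line[0]),
-- or a line whose first element is one of the three keys but which has no second element (line[1]).
def Pre_get_geo_loc (entry : List (List String)) (geoloc : String) (latitude : String) (longitude : String) : Prop :=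
  ∀ line ∈ entry, line ≠ [] ∧
    ((line.headI = "geographic location" ∨ line.headI = "geographic location (latitude)" ∨
      line.headI = "geographic location (longitude)") → 2 ≤ line.length)
instance (entry : List (List String)) (geoloc : String) (latitude : String) (longitude : String) : Decidable (Pre_get_geo_loc entry geoloc latitude longitude) := by unfold Pre_get_geo_loc; infer_instance
def pvWitness_get_geo_loc : List (List String) × String × String × String :=
  ([["geographic location", "USA"], ["host", "Homo sapiens"]], "g", "la", "lo")

def Spec_get_geo_loc (entry : List (List String)) (geoloc : String) (latitude : String) (longitude : String) (out : List String) : Prop := out = get_geo_loc_alt entry geoloc latitude longitude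
instance (entry : List (List String)) (geoloc : String) (latitude : String) (longitude : String) (out : List String) : Decidable (Spec_get_geo_loc entry geoloc latitude longitude out) := by unfold Spec_get_geo_loc; infer_instance

-- ===== CLAIM =====
def Claim_equal_get_geo_loc : Prop := ∀ (entry : List (List String)) (geoloc : String) (latitude : String) (longitude : String), Dom_get_geo_loc entry geoloc latitude longitude → Pre_get_geo_loc entry geoloc latitude longitude → Spec_get_geo_loc entry geoloc latitude longitude (get_geo_loc entry geoloc latitude longitude)

-- ===== LEMMAS AND PROOFS =====
lemma pvGet0 (a : String) (rest : List String) : PySem.List.pyGet? (a :: rest) 0 = some a := by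
  simp [PySem.List.pyGet?, PySem.List.pyIdx?]
lemma pvGet1 (a b : String) (tl : List String) : PySem.List.pyGet? (a :: b :: tl) 1 = some b := by
  simp [PySem.List.pyGet?, PySem.List.pyIdx?]

-- appending one line at the end of the scanned (reversed) list only changes the default
lemma pvFindLast_append (xs : List (List String)) (line : List String) (k d : String) :
    pvFindLast (xs ++ [line]) k d
      = pvFindLast xs k
          (match line with
           | a :: b :: _ => if a = k then b else d
           | _ => d) := by
  induction xs with
  | nil =>
    cases line with
    | nil => rfl
    | cons a tl => cases tl with
      | nil => rfl
      | cons b tl' => simp [pvFindLast]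
  | cons x rest ih =>
    cases x with
    | nil => simpa [pvFindLast] using ih
    | cons a tl => cases tl with
      | nil => simpa [pvFindLast] using ih
      | cons b tl' =>
        by_cases h : a = k <;> simp [pvFindLast, h, ih]

-- Loop invariant: A's fold equals B's three reverse scans, for any start state.
lemma pv_fold_agree (entry : List (List String)) :
    ∀ (g la lo : String),
      (∀ line ∈ entry, line ≠ [] ∧
        ((line.headI = "geographic location" ∨ line.headI = "geographic location (latitude)" ∨
          line.headI = "geographic location (longitude)") → 2 ≤ line.length)) →
      entry.foldl pvStepA (g, la, lo)
      = (pvFindLast entry.reverse "geographic location" g,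
         pvFindLast entry.reverse "geographic location (latitude)" la,
         pvFindLast entry.reverse "geographic location (longitude)" lo) := by
  induction entry with
  | nil => intro g la lo _; rfl
  | cons line rest ih =>
    intro g la lo hpre
    obtain ⟨hne, hlen⟩ := hpre line (List.mem_cons_self ..)
    have hrest := fun l hl => hpre l (List.mem_cons_of_mem _ hl)
    simp only [List.foldl_cons, List.reverse_cons, pvFindLast_append]
    match line, hne with
    | [a], _ =>
      have : ¬ (a = "geographic location" ∨ a = "geographic location (latitude)" ∨
          a = "geographic location (longitude)") := by
        intro h; have := hlen (by simpa using h); simp at this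
      push_neg at this
      obtain ⟨n1, n2, n3⟩ := this
      simpa [pvStepA, pvGet0, n1, n2, n3] using ih g la lo hrest
    | a :: b :: tl, _ =>
      by_cases h1 : a = "geographic location"
      · subst h1
        simpa [pvStepA, pvGet0, pvGet1] using ih b la lo hrest
      · by_cases h2 : a = "geographic location (latitude)"
        · subst h2
          simpa [pvStepA, pvGet0, pvGet1, h1] using ih g b lo hrest
        · by_cases h3 : a = "geographic location (longitude)"
          · subst h3
            simpa [pvStepA, pvGet0, pvGet1, h1, h2] using ih g la b hrest
          · simpa [pvStepA, pvGet0, pvGet1, h1, h2, h3] using ih g la lo hrest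

-- ===== VERDICT =====
theorem get_geo_loc_spec : Claim_equal_get_geo_loc := by
  intro entry g la lo _ hpre
  show get_geo_loc entry g la lo = get_geo_loc_alt entry g la lo
  simp only [get_geo_loc, get_geo_loc_alt]
  rw [pv_fold_agree entry g la lo hpre]
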